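-- pv_equiv track=rewrite | github.com/IsaacG/Advent-of-Code | flipflop.slome/2025/d04.py | solve
-- ===== SOURCE A (Python) =====
-- def solve(part: int, data: list[list[int]]) -> int:
--     """Solve the parts."""
--     x, y = 0, 0
--     total = 0
--     if part == 3:
--         data.sort(key=sum)
--     for a, b in data:
--         dx, dy = abs(x - a), abs(y - b)
--         if part == 1:
--             total += dx + dy
--         else:
--             total += max(dx, dy)
--         x, y = a, b
--     return total
-- ===== SOURCE B (Python) =====
-- def _tv(seq):
--     """Total variation of a 1-D sequence."""
--     if len(seq) < 2:
--         return 0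
--     return abs(seq[1] - seq[0]) + _tv(seq[1:])
--
--
-- def solve(part: int, data: list[list[int]]) -> int:
--     """Solve the parts."""
--     if part == 3:
--         data.sort(key=sum)
--     if part == 1:
--         # Manhattan separates per axis: sum |dx| and sum |dy| independently.
--         return _tv([0] + [a for a, b in data]) + _tv([0] + [b for a, b in data])
--     # Chebyshev = Manhattan in 45-degree rotated coordinates (u, v) = (x+y, x-y), halved.
--     us = [0] + [a + b for a, b in data]
--     vs = [0] + [a - b for a, b in data]
--     return (_tv(us) + _tv(vs)) // 2
-- ===== Notes on version B (the rewrite author's own statement) =====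
-- stated objective: alternative
-- what changed: Replaces A's running-point accumulator loop by a per-axis decomposition: part 1 sums the total variation of the x-stream and y-stream separately, and the Chebyshev parts are reduced to Manhattan via the rotation (u,v)=(x+y,x-y) using max(|dx|,|dy|)=(|du|+|dv|)/2, so B never walks point pairs at all.
import Mathlib
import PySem

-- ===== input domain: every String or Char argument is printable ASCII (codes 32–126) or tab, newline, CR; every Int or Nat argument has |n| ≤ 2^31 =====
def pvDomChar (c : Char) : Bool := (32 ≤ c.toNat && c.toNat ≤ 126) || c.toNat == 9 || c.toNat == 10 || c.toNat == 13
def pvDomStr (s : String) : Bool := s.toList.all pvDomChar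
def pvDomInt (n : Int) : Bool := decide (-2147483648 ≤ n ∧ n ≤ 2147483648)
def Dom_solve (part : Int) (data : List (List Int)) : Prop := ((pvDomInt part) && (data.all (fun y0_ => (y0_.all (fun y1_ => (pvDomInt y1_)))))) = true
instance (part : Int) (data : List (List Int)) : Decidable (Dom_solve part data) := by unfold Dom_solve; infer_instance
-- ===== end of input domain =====

-- B replaces A's running-point loop by a per-axis decomposition: part 1 sums the total
-- variation of the x- and y-streams separately; other parts use the rotation
-- (u,v)=(x+y,x-y), where Chebyshev = Manhattan/2 (objective: alternative algorithm).
-- Both A and B sort `data` in place when part == 3; the equivalence proved is about the return value.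


-- ===== PORT A =====
-- one loop step: state is (x, y, total); rows not of length 2 are outside Pre_solve
def solveStep (part : Int) (st : Int × Int × Int) (row : List Int) : Int × Int × Int :=
  match row with
  | [a, b] =>
    let dx := |st.1 - a|
    let dy := |st.2.1 - b|
    (a, b, st.2.2 + (if part == 1 then dx + dy else max dx dy))
  | _ => st

def solve (part : Int) (data : List (List Int)) : Int :=
  let data := if part == 3 then PySem.List.sorted data (fun r => r.sum) false else data
  (data.foldl (solveStep part) (0, 0, 0)).2.2

-- ===== PORT B =====
-- total variation of a 1-D sequence (Source B's recursive _tv)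
def tv : List Int → Int
  | a :: b :: rest => |b - a| + tv (b :: rest)
  | _ => 0

def solve_alt (part : Int) (data : List (List Int)) : Int :=
  let data := if part == 3 then PySem.List.sorted data (fun r => r.sum) false else data
  if part == 1 then
    tv (0 :: data.map (fun r => r.headD 0)) + tv (0 :: data.map (fun r => (r.drop 1).headD 0))
  else
    PySem.Int.floordiv
      (tv (0 :: data.map (fun r => r.headD 0 + (r.drop 1).headD 0)) +
       tv (0 :: data.map (fun r => r.headD 0 - (r.drop 1).headD 0))) 2

-- ===== PRECONDITION & SPEC =====
-- Pre_ excludes rows not of exactly two coordinates: Python A's unpacking `for a, b in data`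
-- raises ValueError there (B's comprehensions raise likewise).
def Pre_solve (part : Int) (data : List (List Int)) : Prop := ∀ r ∈ data, r.length = 2
instance (part : Int) (data : List (List Int)) : Decidable (Pre_solve part data) := by unfold Pre_solve; infer_instance
def pvWitness_solve : Int × List (List Int) := (3, [[3, 4], [1, 1], [0, -2]])
def Spec_solve (part : Int) (data : List (List Int)) (out : Int) : Prop := out = solve_alt part data
instance (part : Int) (data : List (List Int)) (out : Int) : Decidable (Spec_solve part data out) := by unfold Spec_solve; infer_instance

-- ===== CLAIM (what is proved, stated in full; the proofs are below) =====
def Claim_equal_solve : Prop := ∀ (part : Int) (data : List (List Int)), Dom_solve part data → Pre_solve part data → Spec_solve part data (solve part data)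

-- ===== LEMMAS AND PROOFS =====

-- A's loop from state (x, y, t), on rows all of length 2, part = 1 (Manhattan):
theorem loop_manhattan : ∀ (rows : List (List Int)), (∀ r ∈ rows, r.length = 2) →
    ∀ (x y t : Int),
    (rows.foldl (solveStep 1) (x, y, t)).2.2 =
      t + tv (x :: rows.map (fun r => r.headD 0)) + tv (y :: rows.map (fun r => (r.drop 1).headD 0)) := by
  intro rows
  induction rows with
  | nil => intro _ x y t; simp [tv]
  | cons r rs ih =>
    intro h x y t
    have hr : r.length = 2 := h r (by simp)
    match r, hr with
    | [a, b], _ =>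
      have hrs : ∀ r ∈ rs, r.length = 2 := fun r hm => h r (by simp [hm])
      simp only [List.foldl_cons, solveStep, List.map_cons, List.headD_cons,
        List.drop_succ_cons, List.drop_zero, tv]
      rw [ih hrs, abs_sub_comm x a, abs_sub_comm y b]
      norm_num
      ring

-- A's loop, part ≠ 1 (Chebyshev): twice the loop total is the rotated total variation
theorem loop_chebyshev (part : Int) (hp : ¬ part == 1) :
    ∀ (rows : List (List Int)), (∀ r ∈ rows, r.length = 2) →
    ∀ (x y t : Int),
    2 * (rows.foldl (solveStep part) (x, y, t)).2.2 =
      2 * t + tv ((x + y) :: rows.map (fun r => r.headD 0 + (r.drop 1).headD 0))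
            + tv ((x - y) :: rows.map (fun r => r.headD 0 - (r.drop 1).headD 0)) := by
  intro rows
  induction rows with
  | nil => intro _ x y t; simp [tv]
  | cons r rs ih =>
    intro h x y t
    have hr : r.length = 2 := h r (by simp)
    match r, hr with
    | [a, b], _ =>
      have hrs : ∀ r ∈ rs, r.length = 2 := fun r hm => h r (by simp [hm])
      have key : |(a + b) - (x + y)| + |(a - b) - (x - y)| = 2 * max |x - a| |y - b| := by
        rcases abs_cases (x - a) with ⟨hx, _⟩ | ⟨hx, _⟩ <;>
          rcases abs_cases (y - b) with ⟨hy, _⟩ | ⟨hy, _⟩ <;>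
          rcases max_cases |x - a| |y - b| with ⟨hm, _⟩ | ⟨hm, _⟩ <;>
          rcases abs_cases ((a + b) - (x + y)) with ⟨hu, _⟩ | ⟨hu, _⟩ <;>
          rcases abs_cases ((a - b) - (x - y)) with ⟨hv, _⟩ | ⟨hv, _⟩ <;>
          omega
      simp only [List.foldl_cons, solveStep, List.map_cons, List.headD_cons,
        List.drop_succ_cons, List.drop_zero, tv, if_neg hp]
      rw [ih hrs]
      omega

theorem solve_core (part : Int) (rows : List (List Int)) (h : ∀ r ∈ rows, r.length = 2) :
    (rows.foldl (solveStep part) (0, 0, 0)).2.2 =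
      (if part == 1 then
        tv (0 :: rows.map (fun r => r.headD 0)) + tv (0 :: rows.map (fun r => (r.drop 1).headD 0))
      else
        PySem.Int.floordiv
          (tv (0 :: rows.map (fun r => r.headD 0 + (r.drop 1).headD 0)) +
           tv (0 :: rows.map (fun r => r.headD 0 - (r.drop 1).headD 0))) 2) := by
  by_cases hp : part == 1
  · have h1 : part = 1 := by simpa using hp
    subst h1
    simpa using loop_manhattan rows h 0 0 0
  · have h2 : 2 * (rows.foldl (solveStep part) (0, 0, 0)).2.2 =
        tv (0 :: rows.map (fun r => r.headD 0 + (r.drop 1).headD 0)) +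
        tv (0 :: rows.map (fun r => r.headD 0 - (r.drop 1).headD 0)) := by
      simpa using loop_chebyshev part hp rows h 0 0 0
    simp only [if_neg hp]
    rw [← h2, PySem.Int.floordiv, Int.mul_fdiv_cancel_left _ (by norm_num)]

-- ===== VERDICT (by name: the statement is the Claim_ definition above) =====
theorem solve_spec : Claim_equal_solve := by
  intro part data _ hpre
  unfold Spec_solve solve solve_alt
  by_cases hp : part == 3
  · simp only [hp, if_pos]
    exact solve_core part _ (fun r hm => hpre r ((PySem.List.mem_sorted _ _ _ _).1 hm))
  · simp only [hp, Bool.false_eq_true, if_false]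
    exact solve_core part data hpre
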